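-- pv_equiv track=rewrite | github.com/samnjab/ALU_logisim | ripple_carry4.py | op4_test
-- ===== SOURCE A (Python) =====
-- def DecimalToBinary(num: int) -> int:
--     """Turns a decimal number into binary representation"""
--     if num == 0:
--          return 0
--     remainder = num % 2
--     return DecimalToBinary(num // 2) * 10 + remainder
--
-- def turn_into(num: int, d: int) -> (str, str):
--     """ Turns an arbitrarily long binary number into a binary number of length d.
--         returns the truncated binary number and its carryout in str format. """
--     num_len = len(str(num))
--     cout = 0
--     while num_len > d:
--         cout += 10 ** (len(str(num)) - 1)
--         num = num - 10 ** (len(str(num)) - 1)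
--         num_len = len(str(num))
--     s = ''
--     for i in range(d - 1, -1, -1):
--         s = s + str(num // (10 ** i))
--         num = num % (10 ** i)
--     return s, str(int(cout / 10 ** d))
--
-- def op4_test(A: list, B: list) -> list[list]:
--     """ returns a matrix of strs to test op4"""
--     matrix = []
--     for a in A:
--         for b in B:
--             row = []
--             row.append(turn_into(DecimalToBinary(a), 4)[0])
--             row.append(turn_into(DecimalToBinary(b), 4)[0])
--             if a == 0 and b == 0:
--                 row.append(turn_into(DecimalToBinary(0), 8)[0])
--             else:
--                 row.append(turn_into(DecimalToBinary(1), 8)[0])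
--             matrix.append(row)
--     return matrix
-- ===== SOURCE B (Python) =====
-- def op4_test(A: list, B: list) -> list[list]:
--     """returns a matrix of strs to test op4"""
--     binA = [format(a % 16, '04b') for a in A]
--     binB = [format(b % 16, '04b') for b in B]
--     return [[x, y, '00000000' if a == 0 and b == 0 else '00000001']
--             for a, x in zip(A, binA)
--             for b, y in zip(B, binB)]
-- ===== Notes on version B (the rewrite author's own statement) =====
-- stated objective: faster
-- what changed: B replaces the per-pair recursive decimal-encoded binary conversion (DecimalToBinary + turn_into digit stripping) with a single format(a % 16, '04b') conversion precomputed once per list element, and assembles the matrix from those tables with constant third-column strings.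
import Mathlib
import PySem

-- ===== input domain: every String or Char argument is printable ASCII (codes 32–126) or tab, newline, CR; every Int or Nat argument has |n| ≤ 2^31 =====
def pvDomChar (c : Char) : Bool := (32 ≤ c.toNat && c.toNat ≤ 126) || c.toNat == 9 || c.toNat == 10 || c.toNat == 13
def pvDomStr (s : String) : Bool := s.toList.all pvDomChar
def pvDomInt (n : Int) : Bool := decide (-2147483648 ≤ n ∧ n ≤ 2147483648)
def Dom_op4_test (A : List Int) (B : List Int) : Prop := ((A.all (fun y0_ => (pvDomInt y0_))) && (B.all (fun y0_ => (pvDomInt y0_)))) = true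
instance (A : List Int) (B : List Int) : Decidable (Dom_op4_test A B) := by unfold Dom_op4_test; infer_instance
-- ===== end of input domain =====

-- B precomputes each operand's 4-bit string once per list element instead of once per pair
-- and assembles the matrix from those tables (objective: avoid per-pair recomputation).

-- ===== PORT A =====

-- DecimalToBinary: recursion `DecimalToBinary(num // 2) * 10 + num % 2`.
-- For num < 0 Python recurses forever (RecursionError) — those inputs are outside Pre_;
-- the `num < 0 → 0` branch only makes the Lean function total there.
def decimalToBinary (num : Int) : Int :=
  if num = 0 then 0
  else if num < 0 then 0
  else decimalToBinary (PySem.Int.floordiv num 2) * 10 + PySem.Int.mod num 2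
termination_by num.toNat
decreasing_by
  have h2 : PySem.Int.floordiv num 2 = num / 2 := PySem.Int.floordiv_eq_ediv_of_pos (by norm_num)
  rw [h2]; omega

-- the `while num_len > d` loop of turn_into; state (num, cout).
-- The extra `0 < num` guard only makes the loop total in Lean (when num ≤ 0 and num_len > d
-- the Python loop would not terminate; that state is never reached from op4_test's calls).
def turnIntoLoop (num : Int) (cout : Int) (d : Nat) : Int × Int :=
  if h : d < (PySem.Int.toChars num).length ∧ 0 < num then
    turnIntoLoop (num - 10 ^ ((PySem.Int.toChars num).length - 1))
                 (cout + 10 ^ ((PySem.Int.toChars num).length - 1)) d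
  else (num, cout)
termination_by num.toNat
decreasing_by
  have hp : (0:Int) < 10 ^ ((PySem.Int.toChars num).length - 1) := by positivity
  omega

-- turn_into(num, d): the digit-extraction loop `for i in range(d-1,-1,-1)` builds s;
-- exponent 10**i ported as 10 ^ i.toNat (every i in the range is ≥ 0).
-- Python's 2nd component uses float `cout / 10**d`; ported with floor division — exact
-- whenever the float quotient is, and unused by op4_test (only component [0] is read).
def turnInto (num : Int) (d : Nat) : String × String :=
  let stripped := turnIntoLoop num 0 d
  let final := (PySem.List.pyRange ((d : Int) - 1) (-1) (-1)).foldl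
      (fun (st : List Char × Int) i =>
        (st.1 ++ PySem.Int.toChars (PySem.Int.floordiv st.2 ((10:Int) ^ i.toNat)),
         PySem.Int.mod st.2 ((10:Int) ^ i.toNat)))
      ([], stripped.1)
  (String.ofList final.1, PySem.Int.toStr (PySem.Int.floordiv stripped.2 ((10:Int) ^ d)))

def op4_test (A : List Int) (B : List Int) : List (List String) :=
  A.foldl (fun matrix a =>
    B.foldl (fun matrix b =>
      matrix ++ [[(turnInto (decimalToBinary a) 4).1,
                  (turnInto (decimalToBinary b) 4).1,
                  if a = 0 ∧ b = 0 then (turnInto (decimalToBinary 0) 8).1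
                  else (turnInto (decimalToBinary 1) 8).1]]) matrix) []

-- ===== PORT B =====

-- format(a % 16, '04b'): binary digits of a % 16, zero-padded on the left to width 4.
def bits4 (a : Int) : String :=
  let cs := PySem.Int.toBinChars (PySem.Int.mod a 16)
  String.ofList (List.replicate (4 - cs.length) '0' ++ cs)

def op4_test_alt (A : List Int) (B : List Int) : List (List String) :=
  let binA := A.map bits4
  let binB := B.map bits4
  (A.zip binA).flatMap (fun p =>
    (B.zip binB).map (fun q =>
      [p.2, q.2, if p.1 = 0 ∧ q.1 = 0 then "00000000" else "00000001"]))

-- ===== PRECONDITION & SPEC =====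

-- Pre_ excludes exactly the inputs on which Python A raises: when both lists are nonempty
-- and some element is negative, DecimalToBinary recurses forever (RecursionError).
def Pre_op4_test (A : List Int) (B : List Int) : Prop :=
  A = [] ∨ B = [] ∨ ((∀ a ∈ A, 0 ≤ a) ∧ (∀ b ∈ B, 0 ≤ b))
instance (A : List Int) (B : List Int) : Decidable (Pre_op4_test A B) := by
  unfold Pre_op4_test; infer_instance

def pvWitness_op4_test : List Int × List Int := ([0, 5, 16, 2147483648], [1, 2])

def Spec_op4_test (A : List Int) (B : List Int) (out : List (List String)) : Prop := out = op4_test_alt A B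
instance (A : List Int) (B : List Int) (out : List (List String)) : Decidable (Spec_op4_test A B out) := by unfold Spec_op4_test; infer_instance

-- ===== CLAIM (what is proved, stated in full; the proofs are below) =====
def Claim_equal_op4_test : Prop := ∀ (A : List Int) (B : List Int), Dom_op4_test A B → Pre_op4_test A B → Spec_op4_test A B (op4_test A B)

-- ===== LEMMAS AND PROOFS =====

-- dbN: DecimalToBinary on Nat (proof-side mirror).
def dbN (n : Nat) : Nat :=
  if n = 0 then 0 else dbN (n / 2) * 10 + n % 2
termination_by n
decreasing_by omega

lemma db_cast (n : Nat) : decimalToBinary (n : Int) = (dbN n : Int) := by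
  induction n using Nat.strong_induction_on with
  | _ n ih =>
    rw [decimalToBinary, dbN]
    rcases Nat.eq_zero_or_pos n with h0 | hpos
    · simp [h0]
    · have hne : (n : Int) ≠ 0 := by exact_mod_cast Nat.pos_iff_ne_zero.mp hpos
      have hnlt : ¬ ((n : Int) < 0) := by omega
      have h1 : PySem.Int.floordiv (n : Int) 2 = ((n / 2 : Nat) : Int) := by
        exact_mod_cast PySem.Int.floordiv_natCast n 2
      have h2 : PySem.Int.mod (n : Int) 2 = ((n % 2 : Nat) : Int) := by
        exact_mod_cast PySem.Int.mod_natCast n 2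
      rw [if_neg hne, if_neg hnlt, if_neg (Nat.pos_iff_ne_zero.mp hpos), h1, h2,
        ih (n / 2) (Nat.div_lt_self hpos (by norm_num))]
      push_cast; ring

-- the decimal digits of dbN n are the binary digits of n
lemma dbN_mod (k : Nat) : ∀ n : Nat,
    dbN n % 10 ^ k = ∑ i ∈ Finset.range k, (n / 2 ^ i % 2) * 10 ^ i := by
  induction k with
  | zero => intro n; simp [Nat.mod_one]
  | succ k ih =>
    intro n
    rw [Finset.sum_range_succ']
    simp only [pow_zero, mul_one, Nat.div_one]
    have hstep : ∀ i : Nat, n / 2 ^ (i + 1) % 2 * 10 ^ (i + 1)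
        = 10 * ((n / 2) / 2 ^ i % 2 * 10 ^ i) := by
      intro i
      rw [pow_succ, pow_succ']
      rw [Nat.div_div_eq_div_mul, mul_comm (2 ^ i) 2, ← Nat.div_div_eq_div_mul]
      ring
    simp only [hstep, ← Finset.mul_sum, ← ih (n / 2)]
    rcases Nat.eq_zero_or_pos n with h0 | hpos
    · simp [h0, dbN]
    · rw [dbN, if_neg (Nat.pos_iff_ne_zero.mp hpos)]
      have hlt : dbN (n / 2) % 10 ^ k < 10 ^ k := Nat.mod_lt _ (by positivity)
      have h2 : n % 2 < 2 := Nat.mod_lt _ (by norm_num)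
      have hsplit : dbN (n / 2) = 10 ^ k * (dbN (n / 2) / 10 ^ k) + dbN (n / 2) % 10 ^ k :=
        (Nat.div_add_mod _ _).symm
      have key : (dbN (n / 2) * 10 + n % 2) % 10 ^ (k + 1)
          = n % 2 + 10 * (dbN (n / 2) % 10 ^ k) := by
        conv_lhs => rw [hsplit]
        have e : (10 ^ k * (dbN (n / 2) / 10 ^ k) + dbN (n / 2) % 10 ^ k) * 10 + n % 2
            = (n % 2 + 10 * (dbN (n / 2) % 10 ^ k)) + 10 ^ (k + 1) * (dbN (n / 2) / 10 ^ k) := by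
          rw [pow_succ]; ring
        rw [e, Nat.add_mul_mod_self_left, Nat.mod_eq_of_lt (by rw [pow_succ]; omega)]
      rw [key]; omega

-- length facts about str(n) = Nat.toDigits 10 n
lemma toChars_natCast (n : Nat) : PySem.Int.toChars (n : Int) = Nat.toDigits 10 n := by
  simp [PySem.Int.toChars]

lemma len_lt10 (n : Nat) (h : n < 10) : (Nat.toDigits 10 n).length = 1 := by
  simp [Nat.toDigits, Nat.toDigitsCore, Nat.div_eq_of_lt h]

lemma lenCore_fuel (n : Nat) : ∀ (f1 f2 : Nat), n < f1 → n < f2 →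
    (Nat.toDigitsCore 10 f1 n []).length = (Nat.toDigitsCore 10 f2 n []).length := by
  induction n using Nat.strong_induction_on with
  | _ n ih =>
    intro f1 f2 h1 h2
    obtain ⟨a, rfl⟩ : ∃ a, f1 = a + 1 := ⟨f1 - 1, by omega⟩
    obtain ⟨b, rfl⟩ : ∃ b, f2 = b + 1 := ⟨f2 - 1, by omega⟩
    simp only [Nat.toDigitsCore]
    by_cases h : n / 10 = 0
    · simp [h]
    · have hn10 : 10 ≤ n := by omega
      simp only [h, if_false]
      rw [Nat.toDigitsCore_lens_eq, Nat.toDigitsCore_lens_eq]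
      rw [ih (n / 10) (by omega) a b (by omega) (by omega)]

lemma len_step (n : Nat) (h : 10 ≤ n) :
    (Nat.toDigits 10 n).length = (Nat.toDigits 10 (n / 10)).length + 1 := by
  have hne : ¬ (n / 10 = 0) := by omega
  simp only [Nat.toDigits]
  conv_lhs => rw [Nat.toDigitsCore]
  simp only [hne, if_false]
  rw [Nat.toDigitsCore_lens_eq]
  rw [lenCore_fuel (n / 10) n (n / 10 + 1) (by omega) (by omega)]

lemma len_bounds (n : Nat) : 0 < n →
    10 ^ ((Nat.toDigits 10 n).length - 1) ≤ n ∧ n < 10 ^ (Nat.toDigits 10 n).length := by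
  induction n using Nat.strong_induction_on with
  | _ n ih =>
    intro hpos
    by_cases h : n < 10
    · rw [len_lt10 n h]; simp; omega
    · rw [len_step n (by omega)]
      have hd : 0 < n / 10 := Nat.div_pos (by omega) (by norm_num)
      obtain ⟨h1, h2⟩ := ih (n / 10) (by omega) hd
      have hL1 : 1 ≤ (Nat.toDigits 10 (n / 10)).length := by
        by_contra hc
        have : (Nat.toDigits 10 (n / 10)).length = 0 := by omega
        rw [this] at h1 h2
        simp at h1 h2
        omega
      set L := (Nat.toDigits 10 (n / 10)).length with hL
      have e1 : (10:Nat) ^ L = 10 * 10 ^ (L - 1) := by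
        rw [← pow_succ']; congr 1; omega
      have e2 : (10:Nat) ^ (L + 1) = 10 * 10 ^ L := by rw [pow_succ]; ring
      have hdm := Nat.div_add_mod n 10
      have hmod : n % 10 < 10 := Nat.mod_lt _ (by norm_num)
      constructor
      · simp only [Nat.add_sub_cancel]; omega
      · omega

-- the stripping loop computes num mod 10^d
lemma strip (d : Nat) (n : Nat) : ∀ (c : Int),
    (turnIntoLoop (n : Int) c d).1 = ((n % 10 ^ d : Nat) : Int) := by
  induction n using Nat.strong_induction_on with
  | _ n ih =>
    intro c
    rw [turnIntoLoop]
    simp only [toChars_natCast]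
    by_cases hcond : d < (Nat.toDigits 10 n).length ∧ 0 < (n : Int)
    · rw [dif_pos hcond]
      have hnpos : 0 < n := by exact_mod_cast hcond.2
      obtain ⟨hlow, hhigh⟩ := len_bounds n hnpos
      set L := (Nat.toDigits 10 n).length with hL
      have hpow : 0 < (10:Nat) ^ (L - 1) := by positivity
      have hsub : (n : Int) - (10:Int) ^ (L - 1) = ((n - 10 ^ (L - 1) : Nat) : Int) := by
        rw [Nat.cast_sub hlow]; push_cast; ring
      rw [hsub, ih (n - 10 ^ (L - 1)) (by omega)]
      congr 1
      obtain ⟨k, hk⟩ : (10:Nat) ^ d ∣ 10 ^ (L - 1) := pow_dvd_pow 10 (by omega)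
      rw [hk]
      exact Nat.sub_mul_mod (by rw [← hk]; exact hlow)
    · rw [dif_neg hcond]
      rcases Nat.eq_zero_or_pos n with h0 | hpos
      · simp [h0]
      · have hL : (Nat.toDigits 10 n).length ≤ d := by
          by_contra hc
          exact hcond ⟨by omega, by exact_mod_cast hpos⟩
        obtain ⟨_, hhigh⟩ := len_bounds n hpos
        have : n < 10 ^ d := lt_of_lt_of_le hhigh (Nat.pow_le_pow_right (by norm_num) hL)
        rw [Nat.mod_eq_of_lt this]

-- the per-element fact: A's 4-bit string for a equals B's
lemma per_elt (a : Int) (ha : 0 ≤ a) : (turnInto (decimalToBinary a) 4).1 = bits4 a := by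
  obtain ⟨n, rfl⟩ := Int.eq_ofNat_of_zero_le ha
  rw [db_cast]
  simp only [turnInto]
  rw [strip 4 (dbN n) 0, dbN_mod 4 n]
  have hmod16 : PySem.Int.mod ((n:Int)) 16 = ((n % 16 : Nat) : Int) := by
    exact_mod_cast PySem.Int.mod_natCast n 16
  simp only [bits4, hmod16]
  have hsum : ∑ i ∈ Finset.range 4, n / 2 ^ i % 2 * 10 ^ i
      = n % 16 % 2 + 10 * (n % 16 / 2 % 2) + 100 * (n % 16 / 4 % 2)
        + 1000 * (n % 16 / 8 % 2) := by
    simp [Finset.sum_range_succ]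
    omega
  rw [hsum]
  obtain ⟨r, hr16, hrew⟩ : ∃ r, r < 16 ∧ n % 16 = r := ⟨n % 16, by omega, rfl⟩
  rw [hrew]
  interval_cases r <;> decide

lemma const_zero : (turnInto (decimalToBinary 0) 8).1 = "00000000" := by
  have h0 : decimalToBinary 0 = ((0 : Nat) : Int) := by rw [decimalToBinary]; norm_num
  rw [h0]
  simp only [turnInto]
  rw [strip 8 0 0]
  decide

lemma const_one : (turnInto (decimalToBinary 1) 8).1 = "00000001" := by
  have h1 : decimalToBinary 1 = ((1 : Nat) : Int) := by
    rw [show (1:Int) = ((1:Nat):Int) by norm_num, db_cast]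
    have d0 : dbN 0 = 0 := by rw [dbN]; simp
    have d1 : dbN 1 = 1 := by rw [dbN]; norm_num [d0]
    rw [d1]
  rw [h1]
  simp only [turnInto]
  rw [strip 8 1 0]
  decide

lemma zip_self_map {α β : Type} (l : List α) (f : α → β) :
    l.zip (l.map f) = l.map (fun a => (a, f a)) := by
  induction l with
  | nil => rfl
  | cons x xs ih => simp [ih]

lemma flatMap_congr_mem {α β : Type} (l : List α) (f g : α → List β)
    (h : ∀ a ∈ l, f a = g a) : l.flatMap f = l.flatMap g := by
  induction l with
  | nil => rfl
  | cons x xs ih =>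
    simp only [List.flatMap_cons]
    rw [h x (by simp), ih (fun a ha => h a (by simp [ha]))]

-- ===== VERDICT (by name: the statement is the Claim_ definition above) =====
theorem op4_test_spec : Claim_equal_op4_test := by
  intro A B _ hpre
  unfold Spec_op4_test
  simp only [op4_test, op4_test_alt, PySem.List.foldl_append_singleton_eq_map]
  rw [PySem.List.foldl_append_eq_flatMap]
  simp only [zip_self_map, List.flatMap_map, List.map_map, List.nil_append,
    Function.comp_def, const_zero, const_one]
  rcases hpre with h | h | ⟨hA, hB⟩
  · simp [h]
  · simp [h]
  · refine flatMap_congr_mem _ _ _ (fun a ha => ?_)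
    refine List.map_congr_left (fun b hb => ?_)
    rw [per_elt a (hA a ha), per_elt b (hB b hb)]
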